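-- pv_equiv track=rewrite | github.com/mJJacinth/Protein-Sequencing | hw6_protein.py | makeAminoAcidLabels
-- ===== SOURCE A (Python) =====
-- from itertools import zip_longest
--
-- def combineProteins(proteinList):
--     combine_pro=[]
--     for i in proteinList:
--         for j in i:
--             combine_pro.append(j)
--     return combine_pro
--
-- def makeAminoAcidLabels(proteinList1, proteinList2):
--     pro_lis1,pro_lis2=combineProteins(proteinList1),combineProteins(proteinList2)
--     lst=[]
--     for i,j in zip_longest(pro_lis1,pro_lis2):
--         if i not in lst and i!=None:
--             lst.append(i)
--         if j not in lst and j!= None: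
--             lst.append(j)
--     return sorted(lst)
-- ===== SOURCE B (Python) =====
-- def makeAminoAcidLabels(proteinList1, proteinList2):
--     flat = [aa for protein in proteinList1 for aa in protein]
--     flat.extend(aa for protein in proteinList2 for aa in protein)
--     flat.sort()
--     out = []
--     prev = None
--     for x in flat:
--         if prev is None or x != prev:
--             out.append(x)
--             prev = x
--     return out
-- ===== Notes on version B (the rewrite author's own statement) =====
-- stated objective: simpler
-- what changed: Replaces zip_longest interleaving plus list-membership dedup followed by a sort, by a single flatten, one sort, and a one-pass adjacent dedup on the sorted list.
import Mathlib
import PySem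

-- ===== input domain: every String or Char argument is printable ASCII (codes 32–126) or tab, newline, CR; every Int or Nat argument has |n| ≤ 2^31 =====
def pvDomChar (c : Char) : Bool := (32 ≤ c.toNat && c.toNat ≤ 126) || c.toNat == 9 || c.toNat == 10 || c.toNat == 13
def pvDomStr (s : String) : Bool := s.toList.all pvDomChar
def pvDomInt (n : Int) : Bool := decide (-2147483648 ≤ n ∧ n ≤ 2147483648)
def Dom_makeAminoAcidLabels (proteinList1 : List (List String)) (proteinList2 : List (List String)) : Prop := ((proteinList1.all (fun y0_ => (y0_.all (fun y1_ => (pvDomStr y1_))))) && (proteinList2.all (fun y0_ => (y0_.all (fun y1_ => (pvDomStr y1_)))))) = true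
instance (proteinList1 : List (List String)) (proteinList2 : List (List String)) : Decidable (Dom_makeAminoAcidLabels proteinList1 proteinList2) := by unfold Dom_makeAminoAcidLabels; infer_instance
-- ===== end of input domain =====

-- B flattens both inputs once, sorts, and dedups adjacent duplicates in one pass,
-- instead of A's zip_longest interleaving with a membership-test dedup before the sort (simpler).

-- ===== PORT A =====
def combineProteins (proteinList : List (List String)) : List String :=
  proteinList.foldl (fun acc i => i.foldl (fun a j => a ++ [j]) acc) []

-- one 'if _ not in lst and _ != None: lst.append(_)' statement of A's loop body
-- (for o = none the 'i != None' conjunct fails, so nothing is appended)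
def aStep (lst : List String) (o : Option String) : List String :=
  match o with
  | none => lst
  | some v => if v ∈ lst then lst else lst ++ [v]

-- 'for i, j in zip_longest(pro_lis1, pro_lis2)': the missing side is None
def aLoop : List String → List String → List String → List String
  | lst, [], [] => lst
  | lst, [], j :: js => aLoop (aStep (aStep lst none) (some j)) [] js
  | lst, i :: is, [] => aLoop (aStep (aStep lst (some i)) none) is []
  | lst, i :: is, j :: js => aLoop (aStep (aStep lst (some i)) (some j)) is js

def makeAminoAcidLabels (proteinList1 : List (List String)) (proteinList2 : List (List String)) : List String :=
  let pro_lis1 := combineProteins proteinList1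
  let pro_lis2 := combineProteins proteinList2
  PySem.List.sorted (aLoop [] pro_lis1 pro_lis2) (fun x => x) false

-- ===== PORT B =====
-- 'for x in flat: if prev is None or x != prev: out.append(x); prev = x'
def bDedupLoop : Option String → List String → List String
  | _, [] => []
  | none, x :: xs => x :: bDedupLoop (some x) xs
  | some p, x :: xs => if x = p then bDedupLoop (some p) xs else x :: bDedupLoop (some x) xs

def makeAminoAcidLabels_alt (proteinList1 : List (List String)) (proteinList2 : List (List String)) : List String :=
  let flat := proteinList1.flatMap (fun p => p) ++ proteinList2.flatMap (fun p => p)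
  bDedupLoop none (PySem.List.sorted flat (fun x => x) false)

-- ===== PRECONDITION & SPEC =====
def Spec_makeAminoAcidLabels (proteinList1 : List (List String)) (proteinList2 : List (List String)) (out : List String) : Prop := out = makeAminoAcidLabels_alt proteinList1 proteinList2
instance (proteinList1 : List (List String)) (proteinList2 : List (List String)) (out : List String) : Decidable (Spec_makeAminoAcidLabels proteinList1 proteinList2 out) := by unfold Spec_makeAminoAcidLabels; infer_instance

-- ===== CLAIM (what is proved, stated in full; the proofs are below) =====
def Claim_equal_makeAminoAcidLabels : Prop := ∀ (proteinList1 : List (List String)) (proteinList2 : List (List String)), Dom_makeAminoAcidLabels proteinList1 proteinList2 → Spec_makeAminoAcidLabels proteinList1 proteinList2 (makeAminoAcidLabels proteinList1 proteinList2)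

-- ===== LEMMAS AND PROOFS =====
lemma combineProteins_eq (l : List (List String)) :
    combineProteins l = l.flatMap (fun p => p) := by
  show l.foldl (fun acc i => i.foldl (fun a j => a ++ [j]) acc) [] = _
  have h : ∀ (l : List (List String)) (acc : List String),
      l.foldl (fun acc i => i.foldl (fun a j => a ++ [j]) acc) acc
        = acc ++ l.flatMap (fun p => p) := by
    intro l
    induction l with
    | nil => simp
    | cons i is ih =>
        intro acc
        rw [List.foldl_cons, PySem.List.foldl_append_singleton, ih, List.flatMap_cons,
          List.append_assoc]
  simpa using h l []

lemma mem_aStep (lst : List String) (o : Option String) (x : String) :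
    x ∈ aStep lst o ↔ x ∈ lst ∨ o = some x := by
  cases o with
  | none => simp [aStep]
  | some v =>
      by_cases h : v ∈ lst
      · simp [aStep, h]
        aesop
      · simp [aStep, h, or_comm, eq_comm]

lemma nodup_aStep (lst : List String) (o : Option String) (h : lst.Nodup) :
    (aStep lst o).Nodup := by
  cases o with
  | none => exact h
  | some v =>
      by_cases hv : v ∈ lst
      · simpa [aStep, hv] using h
      · simp only [aStep, if_neg hv]
        simpa using List.Nodup.concat hv h

lemma aLoop_spec : ∀ (as bs lst : List String), lst.Nodup →
    (aLoop lst as bs).Nodup ∧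
      ∀ x, (x ∈ aLoop lst as bs ↔ x ∈ lst ∨ x ∈ as ∨ x ∈ bs) := by
  intro as
  induction as with
  | nil =>
      intro bs
      induction bs with
      | nil => intro lst h; simpa [aLoop] using h
      | cons j js ihb =>
          intro lst h
          have hstep : (aStep (aStep lst none) (some j)).Nodup :=
            nodup_aStep _ _ (nodup_aStep _ _ h)
          obtain ⟨hn, hm⟩ := ihb _ hstep
          refine ⟨by simpa [aLoop] using hn, ?_⟩
          intro x
          have := hm x
          simp [aLoop, aStep] at *
          aesop
  | cons i is iha =>
      intro bs
      cases bs with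
      | nil =>
          intro lst h
          have hstep : (aStep (aStep lst (some i)) none).Nodup :=
            nodup_aStep _ _ (nodup_aStep _ _ h)
          obtain ⟨hn, hm⟩ := iha [] _ hstep
          refine ⟨by simpa [aLoop] using hn, ?_⟩
          intro x
          have := hm x
          simp [aLoop, aStep] at *
          aesop
      | cons j js =>
          intro lst h
          have hstep : (aStep (aStep lst (some i)) (some j)).Nodup :=
            nodup_aStep _ _ (nodup_aStep _ _ h)
          obtain ⟨hn, hm⟩ := iha js _ hstep
          refine ⟨by simpa [aLoop] using hn, ?_⟩
          intro x
          have := hm x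
          simp [aLoop, this, mem_aStep] at *
          aesop

lemma bDedup_some : ∀ (xs : List String) (p : String),
    xs.Pairwise (· ≤ ·) → (∀ y ∈ xs, p ≤ y) →
    (bDedupLoop (some p) xs).Pairwise (· < ·) ∧
      ∀ x, (x ∈ bDedupLoop (some p) xs ↔ x ∈ xs ∧ x ≠ p) := by
  intro xs
  induction xs with
  | nil => intro p _ _; simp [bDedupLoop]
  | cons a xs ih =>
      intro p hs hb
      have ha : ∀ y ∈ xs, a ≤ y := by
        intro y hy; exact (List.pairwise_cons.mp hs).1 y hy
      have hs' : xs.Pairwise (· ≤ ·) := (List.pairwise_cons.mp hs).2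
      have hpa : p ≤ a := hb a (by simp)
      by_cases hap : a = p
      · subst hap
        obtain ⟨hP, hM⟩ := ih a hs' ha
        refine ⟨by simpa [bDedupLoop] using hP, ?_⟩
        intro x
        simp [bDedupLoop, hM x]
        aesop
      · obtain ⟨hP, hM⟩ := ih a hs' ha
        have hpa' : p < a := lt_of_le_of_ne hpa (fun h => hap h.symm)
        constructor
        · simp only [bDedupLoop, if_neg hap]
          refine List.pairwise_cons.mpr ⟨?_, hP⟩
          intro y hy
          obtain ⟨hy1, hy2⟩ := (hM y).mp hy
          exact lt_of_le_of_ne (ha y hy1) (Ne.symm hy2)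
        · intro x
          simp only [bDedupLoop, if_neg hap, List.mem_cons, hM x]
          constructor
          · rintro (rfl | ⟨h1, h2⟩)
            · exact ⟨Or.inl rfl, fun h => hap h⟩
            · exact ⟨Or.inr h1, fun h => absurd (le_antisymm (h ▸ hpa) (h ▸ ha x h1)) (by aesop)⟩
          · rintro ⟨(rfl | h1), h2⟩
            · exact Or.inl rfl
            · by_cases hxa : x = a
              · exact Or.inl hxa
              · exact Or.inr ⟨h1, hxa⟩

lemma bDedup_none (xs : List String) (hs : xs.Pairwise (· ≤ ·)) :
    (bDedupLoop none xs).Pairwise (· < ·) ∧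
      ∀ x, (x ∈ bDedupLoop none xs ↔ x ∈ xs) := by
  cases xs with
  | nil => simp [bDedupLoop]
  | cons a xs =>
      have ha : ∀ y ∈ xs, a ≤ y := fun y hy => (List.pairwise_cons.mp hs).1 y hy
      obtain ⟨hP, hM⟩ := bDedup_some xs a (List.pairwise_cons.mp hs).2 ha
      constructor
      · show (a :: bDedupLoop (some a) xs).Pairwise (· < ·)
        exact List.pairwise_cons.mpr
          ⟨fun y hy => lt_of_le_of_ne (ha y ((hM y).mp hy).1) (Ne.symm ((hM y).mp hy).2), hP⟩
      · intro x
        simp only [bDedupLoop, List.mem_cons, hM x]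
        by_cases hxa : x = a <;> aesop

-- ===== VERDICT (by name: the statement is the Claim_ definition above) =====
theorem makeAminoAcidLabels_spec : Claim_equal_makeAminoAcidLabels := by
  unfold Claim_equal_makeAminoAcidLabels
  intro p1 p2 _
  unfold Spec_makeAminoAcidLabels makeAminoAcidLabels makeAminoAcidLabels_alt
  simp only [combineProteins_eq]
  set flat := p1.flatMap (fun p => p) ++ p2.flatMap (fun p => p) with hflat
  set S := PySem.List.sorted flat (fun x => x) false with hS
  have hSp : S.Pairwise (· ≤ ·) := PySem.List.sorted_pairwise flat (fun x => x)
  obtain ⟨hBp, hBm⟩ := bDedup_none S hSp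
  obtain ⟨hAn, hAm⟩ := aLoop_spec (p1.flatMap (fun p => p)) (p2.flatMap (fun p => p)) [] (by simp)
  have hperm : (bDedupLoop none S).Perm (aLoop [] (p1.flatMap (fun p => p)) (p2.flatMap (fun p => p))) := by
    rw [List.perm_ext_iff_of_nodup (hBp.imp ne_of_lt) hAn]
    intro x
    rw [hBm x, hAm x, hS, PySem.List.mem_sorted, hflat]
    simp
  exact PySem.List.sorted_eq_of_perm_of_pairwise_lt _ _ _ hperm hBp
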